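-- pv_equiv track=rewrite | github.com/powerof3/MainMenuVideo | template_structural_rules.py | parse_tmpl
-- ===== SOURCE A (Python) =====
-- def parse_tmpl(name):
--     """Split 'Outer<A,B>' → ('Outer', ['A', 'B']). Returns (name, []) for non-templates."""
--     lt = name.find('<')
--     if lt < 0 or not name.endswith('>'):
--         return name, []
--     outer = name[:lt]
--     inner = name[lt + 1:-1]
--     args, depth, start = [], 0, 0
--     for i, c in enumerate(inner):
--         if c == '<':
--             depth += 1
--         elif c == '>':
--             depth -= 1
--         elif c == ',' and depth == 0:
--             a = inner[start:i].strip()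
--             if a:
--                 args.append(a)
--             start = i + 1
--     a = inner[start:].strip()
--     if a:
--         args.append(a)
--     return outer, args
-- ===== SOURCE B (Python) =====
-- def parse_tmpl(name):
--     """Split 'Outer<A,B>' -> ('Outer', ['A', 'B']). Returns (name, []) for non-templates."""
--     if '<' not in name or not name.endswith('>'):
--         return name, []
--     outer, _, rest = name.partition('<')
--     args, buf, bal = [], [], 0
--     for chunk in rest[:-1].split(','):
--         bal += chunk.count('<') - chunk.count('>')
--         buf.append(chunk)
--         if bal == 0:
--             a = ','.join(buf).strip()
--             if a:
--                 args.append(a)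
--             buf = []
--     if buf:
--         a = ','.join(buf).strip()
--         if a:
--             args.append(a)
--     return outer, args
-- ===== Notes on version B (the rewrite author's own statement) =====
-- stated objective: alternative
-- what changed: B replaces A's index-based character scan (enumerate with a depth counter and slices between recorded start indices) by partitioning the name on the first '<', splitting the inner text on commas, and regrouping the comma chunks with a running angle-bracket balance computed per chunk via count(), flushing the rejoined buffer whenever the balance returns to zero.
import Mathlib
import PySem

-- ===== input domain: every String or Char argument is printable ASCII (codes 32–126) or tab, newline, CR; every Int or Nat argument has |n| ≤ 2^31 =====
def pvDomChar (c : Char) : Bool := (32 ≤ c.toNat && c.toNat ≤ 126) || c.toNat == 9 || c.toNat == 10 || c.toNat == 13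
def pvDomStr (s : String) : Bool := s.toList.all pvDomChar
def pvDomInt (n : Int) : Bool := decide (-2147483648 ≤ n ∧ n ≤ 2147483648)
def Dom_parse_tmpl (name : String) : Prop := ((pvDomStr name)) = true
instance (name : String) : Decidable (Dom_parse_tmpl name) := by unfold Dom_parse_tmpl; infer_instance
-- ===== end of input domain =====

-- B partitions the name on the first '<', splits the inner text on commas and regroups the
-- chunks by a running angle-bracket balance (alternative decomposition, same cost);
-- the return values agree everywhere.

-- ===== PORT A =====
-- A's loop body: one enumerated character; state = (args, depth, start); slices index `inner`.
def pvStepA (inner : List Char) (st : List String × Int × Int) (ic : Int × Char) :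
    List String × Int × Int :=
  if ic.2 = '<' then (st.1, st.2.1 + 1, st.2.2)
  else if ic.2 = '>' then (st.1, st.2.1 - 1, st.2.2)
  else if ic.2 = ',' ∧ st.2.1 = 0 then
    let a := PySem.Chars.strip (PySem.Chars.slice inner (some st.2.2) (some ic.1))
    ((if a ≠ [] then st.1 ++ [String.ofList a] else st.1), st.2.1, ic.1 + 1)
  else st

-- A's arg scan over `inner` (the for-loop plus the trailing flush)
def pvArgsA (inner : List Char) : List String :=
  let st := (PySem.List.enumerate inner).foldl (pvStepA inner) ([], 0, 0)
  let a := PySem.Chars.strip (PySem.Chars.slice inner (some st.2.2) none)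
  if a ≠ [] then st.1 ++ [String.ofList a] else st.1

def parse_tmpl (name : String) : String × List String :=
  let lt := PySem.Chars.find name.toList ['<']
  if lt < 0 ∨ PySem.Chars.endswith name.toList ['>'] = false then (name, [])
  else
    let outer := String.ofList (PySem.Chars.slice name.toList none (some lt))
    let inner := PySem.Chars.slice name.toList (some (lt + 1)) (some (-1))
    (outer, pvArgsA inner)

-- ===== PORT B =====
-- B's comma-chunk regrouping loop, as structural recursion over the chunk list;
-- the base case is the post-loop flush of the leftover buffer.
def pvRegroup : List (List Char) → Int → List (List Char) → List String → List String
  | [], _, buf, args =>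
      if buf ≠ [] then
        let a := PySem.Chars.strip (PySem.Chars.join [','] buf)
        if a ≠ [] then args ++ [String.ofList a] else args
      else args
  | ch :: rest, bal, buf, args =>
      let bal' := bal + (PySem.Chars.count ch ['<'] : Int) - (PySem.Chars.count ch ['>'] : Int)
      let buf' := buf ++ [ch]
      if bal' = 0 then
        let a := PySem.Chars.strip (PySem.Chars.join [','] buf')
        pvRegroup rest bal' [] (if a ≠ [] then args ++ [String.ofList a] else args)
      else pvRegroup rest bal' buf' args

def parse_tmpl_alt (name : String) : String × List String :=
  let cs := name.toList
  if PySem.Chars.isIn ['<'] cs = false ∨ PySem.Chars.endswith cs ['>'] = false then (name, [])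
  else
    -- name.partition('<'), ported by hand as the span at the first '<'
    -- (exact here: this branch guarantees '<' occurs in the string)
    let outer := cs.takeWhile (fun c => c != '<')
    let rest := (cs.dropWhile (fun c => c != '<')).drop 1
    let inner := PySem.Chars.slice rest none (some (-1))
    (String.ofList outer, pvRegroup (PySem.Chars.splitOn inner [',']) 0 [] [])

-- ===== PRECONDITION & SPEC =====
def Spec_parse_tmpl (name : String) (out : String × List String) : Prop := out = parse_tmpl_alt name
instance (name : String) (out : String × List String) : Decidable (Spec_parse_tmpl name out) := by unfold Spec_parse_tmpl; infer_instance

-- ===== CLAIM (what is proved, stated in full; the proofs are below) =====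
def Claim_equal_parse_tmpl : Prop := ∀ (name : String), Dom_parse_tmpl name → Spec_parse_tmpl name (parse_tmpl name)

-- ===== LEMMAS AND PROOFS =====

def pvEmit (args : List String) (a : List Char) : List String :=
  if a ≠ [] then args ++ [String.ofList a] else args

def pvScanA : List Char → Int → List Char → List String → List String
  | [], _, pend, args => pvEmit args (PySem.Chars.strip pend)
  | c :: rest, depth, pend, args =>
    if c = '<' then pvScanA rest (depth + 1) (pend ++ [c]) args
    else if c = '>' then pvScanA rest (depth - 1) (pend ++ [c]) args
    else if c = ',' ∧ depth = 0 then pvScanA rest depth [] (pvEmit args (PySem.Chars.strip pend))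
    else pvScanA rest depth (pend ++ [c]) args

def pvTail (full : List Char) (st : List String × Int × Int) : List String :=
  pvEmit st.1 (PySem.Chars.strip (PySem.Chars.slice full (some st.2.2) none))

lemma pvA1gen : ∀ (rest done : List Char) (j : Nat), j ≤ done.length → ∀ (depth : Int) (args : List String),
    pvTail (done ++ rest)
        ((PySem.List.enumerate rest (done.length : Int)).foldl (pvStepA (done ++ rest))
          (args, depth, (j : Int)))
      = pvScanA rest depth (done.drop j) args := by
  intro rest
  induction rest with
  | nil =>
    intro done j hj depth args
    simp only [PySem.List.enumerate_nil, List.foldl_nil, pvTail, pvScanA, List.append_nil]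
    rw [PySem.Chars.slice_eq_listSlice, PySem.List.slice_from _ (Int.natCast_nonneg j)]
    simp
  | cons c rest ih =>
    intro done j hj depth args
    rw [PySem.List.enumerate_cons, List.foldl_cons]
    by_cases h1 : c = '<'
    · subst h1
      show pvTail (done ++ '<' :: rest) ((PySem.List.enumerate rest ((done.length : Int) + 1)).foldl
          (pvStepA (done ++ '<' :: rest)) (pvStepA (done ++ '<' :: rest) (args, depth, (j:Int)) ((done.length : Int), '<'))) = _
      rw [show pvStepA (done ++ '<' :: rest) (args, depth, (j:Int)) ((done.length : Int), '<')
            = (args, depth + 1, (j:Int)) from rfl]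
      rw [List.append_cons done '<' rest]
      have hlen : (done.length : Int) + 1 = (((done ++ ['<']).length : Nat) : Int) := by
        simp
      rw [hlen, ih (done ++ ['<']) j (by simp; omega) (depth + 1) args]
      rw [pvScanA]
      simp [List.drop_append_of_le_length hj]
    · by_cases h2 : c = '>'
      · subst h2
        show pvTail (done ++ '>' :: rest) ((PySem.List.enumerate rest ((done.length : Int) + 1)).foldl
            (pvStepA (done ++ '>' :: rest)) (pvStepA (done ++ '>' :: rest) (args, depth, (j:Int)) ((done.length : Int), '>'))) = _
        rw [show pvStepA (done ++ '>' :: rest) (args, depth, (j:Int)) ((done.length : Int), '>')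
              = (args, depth - 1, (j:Int)) from rfl]
        rw [List.append_cons done '>' rest]
        have hlen : (done.length : Int) + 1 = (((done ++ ['>']).length : Nat) : Int) := by simp
        rw [hlen, ih (done ++ ['>']) j (by simp; omega) (depth - 1) args]
        rw [pvScanA]
        simp [List.drop_append_of_le_length hj]
      · by_cases h3 : c = ',' ∧ depth = 0
        · obtain ⟨h3c, h3d⟩ := h3
          subst h3c h3d
          rw [show pvStepA (done ++ ',' :: rest) (args, 0, (j:Int)) ((done.length : Int), ',')
                = (pvEmit args (PySem.Chars.strip (PySem.Chars.slice (done ++ ',' :: rest) (some (j:Int)) (some (done.length : Int)))),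
                   0, (done.length : Int) + 1) from by
              simp [pvStepA, pvEmit]]
          have ha : PySem.Chars.slice (done ++ ',' :: rest) (some (j:Int)) (some (done.length : Int))
              = done.drop j := by
            rw [PySem.Chars.slice_eq_listSlice, PySem.List.slice_natCast]
            rw [List.drop_append_of_le_length hj]
            exact List.take_left' (by simp)
          rw [ha]
          rw [List.append_cons done ',' rest]
          have hlen : (done.length : Int) + 1 = (((done ++ [',']).length : Nat) : Int) := by simp
          have hlen2 : ((done ++ [',']).length : Nat) = done.length + 1 := by simp
          rw [hlen, ih (done ++ [',']) ((done ++ [',']).length) le_rfl 0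
                (pvEmit args (PySem.Chars.strip (done.drop j)))]
          rw [pvScanA]
          simp
        · rw [show pvStepA (done ++ c :: rest) (args, depth, (j:Int)) ((done.length : Int), c)
                = (args, depth, (j:Int)) from by
              simp [pvStepA, h1, h2]
              intro hc hd
              exact absurd ⟨hc, hd⟩ h3]
          rw [List.append_cons done c rest]
          have hlen : (done.length : Int) + 1 = (((done ++ [c]).length : Nat) : Int) := by simp
          rw [hlen, ih (done ++ [c]) j (by simp; omega) depth args]
          rw [pvScanA]
          simp [h1, h2, h3, List.drop_append_of_le_length hj]

lemma pvArgsA_eq (cs : List Char) : pvArgsA cs = pvScanA cs 0 [] [] := by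
  have h := pvA1gen cs [] 0 (by simp) 0 []
  simp only [List.nil_append, List.length_nil, Nat.cast_zero, List.drop_nil] at h
  rw [← h]
  simp [pvArgsA, pvTail, pvEmit]

def pvBal (ch : List Char) : Int := (ch.count '<' : Int) - (ch.count '>' : Int)

def pvScanB : List (List Char) → Int → List (List Char) → List String → List String
  | [], _, buf, args =>
      if buf ≠ [] then pvEmit args (PySem.Chars.strip (PySem.Chars.join [','] buf)) else args
  | ch :: rest, bal, buf, args =>
      if bal + pvBal ch = 0 then
        pvScanB rest 0 [] (pvEmit args (PySem.Chars.strip (PySem.Chars.join [','] (buf ++ [ch]))))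
      else pvScanB rest (bal + pvBal ch) (buf ++ [ch]) args

def pvPend (buf : List (List Char)) : List Char :=
  match buf with
  | [] => []
  | _ => PySem.Chars.join [','] buf ++ [',']

lemma pvJoinSnoc : ∀ (buf : List (List Char)) (ch : List Char), buf ≠ [] →
    PySem.Chars.join [','] (buf ++ [ch]) = PySem.Chars.join [','] buf ++ ',' :: ch := by
  intro buf
  induction buf with
  | nil => intro ch h; exact absurd rfl h
  | cons b rest ih =>
    intro ch _
    cases rest with
    | nil => simp [PySem.Chars.join_cons_cons, PySem.Chars.join_singleton]
    | cons r rs =>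
      have := ih ch (by simp)
      simp only [List.cons_append] at this ⊢
      rw [PySem.Chars.join_cons_cons, this, PySem.Chars.join_cons_cons]
      simp

lemma pvL2 : ∀ (chunk : List Char), ',' ∉ chunk → ∀ (depth : Int) (pend : List Char) (args : List String),
    pvScanA chunk depth pend args = pvEmit args (PySem.Chars.strip (pend ++ chunk)) := by
  intro chunk
  induction chunk with
  | nil => intro _ depth pend args; simp [pvScanA]
  | cons c chunk ih =>
    intro h depth pend args
    have hc : c ≠ ',' := fun hc => h (hc ▸ List.mem_cons_self)
    have hm : ',' ∉ chunk := fun hm => h (List.mem_cons_of_mem _ hm)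
    by_cases h1 : c = '<'
    · rw [pvScanA, if_pos h1, ih hm, List.append_assoc]; simp [h1]
    · by_cases h2 : c = '>'
      · rw [pvScanA, if_neg h1, if_pos h2, ih hm, List.append_assoc]; simp [h2]
      · rw [pvScanA, if_neg h1, if_neg h2, if_neg (by simp [hc]), ih hm, List.append_assoc]
        simp

lemma pvBal_cons_lt (chunk : List Char) : pvBal ('<' :: chunk) = pvBal chunk + 1 := by
  simp [pvBal]; ring

lemma pvBal_cons_gt (chunk : List Char) : pvBal ('>' :: chunk) = pvBal chunk - 1 := by
  simp [pvBal]; ring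

lemma pvBal_cons_other (c : Char) (chunk : List Char) (h1 : c ≠ '<') (h2 : c ≠ '>') :
    pvBal (c :: chunk) = pvBal chunk := by
  simp [pvBal, h1, h2]

lemma pvL1 : ∀ (chunk : List Char), ',' ∉ chunk → ∀ (rest : List Char) (depth : Int) (pend : List Char) (args : List String),
    pvScanA (chunk ++ ',' :: rest) depth pend args
      = if depth + pvBal chunk = 0 then
          pvScanA rest 0 [] (pvEmit args (PySem.Chars.strip (pend ++ chunk)))
        else pvScanA rest (depth + pvBal chunk) (pend ++ chunk ++ [',']) args := by
  intro chunk
  induction chunk with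
  | nil =>
    intro _ rest depth pend args
    simp only [List.nil_append, pvBal, List.count_nil]
    by_cases hd : depth = 0
    · subst hd
      rw [pvScanA, if_neg (by decide), if_neg (by decide), if_pos ⟨rfl, rfl⟩]
      simp
    · rw [pvScanA, if_neg (by decide), if_neg (by decide), if_neg (by simp [hd])]
      simp [hd]
  | cons c chunk ih =>
    intro h rest depth pend args
    have hc : c ≠ ',' := fun hc => h (hc ▸ List.mem_cons_self)
    have hm : ',' ∉ chunk := fun hm => h (List.mem_cons_of_mem _ hm)
    by_cases h1 : c = '<'
    · subst h1
      rw [List.cons_append, pvScanA, if_pos rfl, ih hm, pvBal_cons_lt]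
      have : depth + 1 + pvBal chunk = depth + (pvBal chunk + 1) := by ring
      rw [this]
      simp [List.append_assoc]
    · by_cases h2 : c = '>'
      · subst h2
        rw [List.cons_append, pvScanA, if_neg (by decide), if_pos rfl, ih hm, pvBal_cons_gt]
        have : depth - 1 + pvBal chunk = depth + (pvBal chunk - 1) := by ring
        rw [this]
        simp [List.append_assoc]
      · rw [List.cons_append, pvScanA, if_neg h1, if_neg h2, if_neg (by simp [hc]), ih hm,
            pvBal_cons_other c chunk h1 h2]
        simp [List.append_assoc]

lemma pvL3 : ∀ (chunks : List (List Char)), chunks ≠ [] → (∀ ch ∈ chunks, ',' ∉ ch) →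
    ∀ (bal : Int) (buf : List (List Char)) (args : List String),
    pvScanB chunks bal buf args
      = pvScanA (PySem.Chars.join [','] chunks) bal (pvPend buf) args := by
  intro chunks
  induction chunks with
  | nil => intro h; exact absurd rfl h
  | cons ch rest ih =>
    intro _ hcf bal buf args
    have hch : ',' ∉ ch := hcf ch List.mem_cons_self
    have hpend : pvPend buf ++ ch = PySem.Chars.join [','] (buf ++ [ch]) := by
      cases buf with
      | nil => simp [pvPend, PySem.Chars.join_singleton]
      | cons b bs =>
        rw [pvJoinSnoc _ _ (List.cons_ne_nil _ _)]
        simp [pvPend]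
    cases rest with
    | nil =>
      rw [pvScanB, PySem.Chars.join_singleton, pvL2 ch hch, hpend]
      by_cases hb : bal + pvBal ch = 0
      · rw [if_pos hb, pvScanB]
        simp
      · rw [if_neg hb, pvScanB, if_pos (by simp)]
    | cons r rs =>
      rw [pvScanB, PySem.Chars.join_cons_cons, List.append_assoc,
          List.singleton_append, pvL1 ch hch, hpend]
      by_cases hb : bal + pvBal ch = 0
      · rw [if_pos hb, if_pos hb, ih (by simp) (fun x hx => hcf x (List.mem_cons_of_mem _ hx))]
        rfl
      · rw [if_neg hb, if_neg hb, ih (by simp) (fun x hx => hcf x (List.mem_cons_of_mem _ hx))]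
        have : pvPend (buf ++ [ch]) = pvPend buf ++ ch ++ [','] := by
          rw [pvPend.eq_def]
          cases buf <;> simp_all
        rw [this, hpend]

lemma pvModHeadId (l : List (List Char)) : List.modifyHead (fun x : List Char => x) l = l := by
  cases l <;> simp

lemma pvSplitGo : ∀ (l : List Char) (fuel : Nat), l.length ≤ fuel → ∀ (cur : List Char) (acc : List (List Char)),
    PySem.Chars.splitOn.go [','] fuel l cur acc
      = acc.reverse ++ (l.splitOn ',').modifyHead (cur.reverse ++ ·) := by
  intro l
  induction l with
  | nil => intro fuel _ cur acc; cases fuel <;> simp [PySem.Chars.splitOn.go, List.splitOn_nil]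
  | cons c t ih =>
    intro fuel hf cur acc
    cases fuel with
    | zero => simp at hf
    | succ f =>
      simp only [PySem.Chars.splitOn.go]
      by_cases hc : c = ','
      · subst hc
        rw [if_pos (by simp [List.isPrefixOf])]
        simp only [List.length_cons, List.length_nil, Nat.zero_add, List.drop_succ_cons, List.drop_zero]
        rw [ih f (by simpa using hf) [] (cur.reverse :: acc)]
        simp [List.splitOn, List.splitOnP_cons, pvModHeadId]
      · rw [if_neg (by simp [List.isPrefixOf]; exact fun h => hc h.symm)]
        rw [ih f (by simpa using hf) (c :: cur) acc]
        simp only [List.splitOn, List.splitOnP_cons, beq_iff_eq, if_neg hc]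
        rcases h : List.splitOnP (fun x => x == ',') t with _ | ⟨hh, tl⟩
        · exact absurd h (List.splitOnP_ne_nil _ _)
        · simp

lemma pvSplitEq (cs : List Char) : PySem.Chars.splitOn cs [','] = cs.splitOn ',' := by
  rw [PySem.Chars.splitOn, pvSplitGo cs (cs.length + 1) (by omega) [] []]
  simp [pvModHeadId]

lemma pvSplitChunksNoComma : ∀ (cs ch : List Char), ch ∈ cs.splitOn ',' → ',' ∉ ch := by
  intro cs
  induction cs with
  | nil => intro ch h; simp [List.splitOn_nil] at h; simp [h]
  | cons c t ih =>
    intro ch h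
    simp only [List.splitOn, List.splitOnP_cons, beq_iff_eq] at h ih
    by_cases hc : c = ','
    · rw [if_pos hc] at h
      rcases List.mem_cons.mp h with h1 | h2
      · simp [h1]
      · exact ih ch h2
    · rw [if_neg hc] at h
      rcases heq : List.splitOnP (fun x => x == ',') t with _ | ⟨hh, tl⟩
      · exact absurd heq (List.splitOnP_ne_nil _ _)
      · rw [heq] at h
        simp only [List.modifyHead] at h
        rcases List.mem_cons.mp h with h1 | h2
        · subst h1
          intro hmem
          rcases List.mem_cons.mp hmem with h3 | h4
          · exact hc h3.symm
          · exact ih hh (by rw [heq]; exact List.mem_cons_self) h4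
        · exact ih ch (by rw [heq]; exact List.mem_cons_of_mem _ h2)

lemma pvCountGo (c : Char) : ∀ (l : List Char) (fuel acc : Nat), l.length ≤ fuel →
    PySem.Chars.count.go [c] fuel l acc = acc + l.count c := by
  intro l
  induction l with
  | nil => intro fuel acc _; cases fuel <;> simp [PySem.Chars.count.go]
  | cons x t ih =>
    intro fuel acc hf
    cases fuel with
    | zero => simp at hf
    | succ f =>
      simp only [PySem.Chars.count.go]
      by_cases hx : x = c
      · subst hx
        rw [if_pos (by simp [List.isPrefixOf])]
        simp only [List.length_cons, List.length_nil, Nat.zero_add, List.drop_succ_cons, List.drop_zero]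
        rw [ih f (acc+1) (by simpa using hf)]
        simp
        omega
      · rw [if_neg (by simp [List.isPrefixOf]; exact fun h => hx h.symm)]
        rw [ih f acc (by simpa using hf)]
        simp [hx]

lemma pvCountSingle (c : Char) (s : List Char) : PySem.Chars.count s [c] = s.count c := by
  simp [PySem.Chars.count, pvCountGo c s s.length 0 le_rfl]

lemma pvRegroup_eq : ∀ (chunks : List (List Char)) (bal : Int) (buf : List (List Char)) (args : List String),
    pvRegroup chunks bal buf args = pvScanB chunks bal buf args := by
  intro chunks
  induction chunks with
  | nil => intro bal buf args; rfl
  | cons ch rest ih =>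
    intro bal buf args
    rw [pvRegroup, pvScanB]
    have hbal : bal + (PySem.Chars.count ch ['<'] : Int) - (PySem.Chars.count ch ['>'] : Int)
        = bal + pvBal ch := by
      rw [pvBal, pvCountSingle, pvCountSingle]; ring
    simp only [hbal]
    by_cases hb : bal + pvBal ch = 0
    · rw [if_pos hb, if_pos hb, ih, hb]
      rfl
    · rw [if_neg hb, if_neg hb, ih]

lemma pvMain (cs : List Char) : pvArgsA cs = pvRegroup (PySem.Chars.splitOn cs [',']) 0 [] [] := by
  rw [pvArgsA_eq, pvSplitEq, pvRegroup_eq]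
  have hne : cs.splitOn ',' ≠ [] := by
    simp only [List.splitOn]; exact List.splitOnP_ne_nil _ _
  have hcf : ∀ ch ∈ cs.splitOn ',', ',' ∉ ch := fun ch h => pvSplitChunksNoComma cs ch h
  rw [pvL3 _ hne hcf]
  have hj : PySem.Chars.join [','] (cs.splitOn ',') = cs := by
    unfold PySem.Chars.join; exact List.intercalate_splitOn cs ','
  rw [hj]
  rfl

lemma pvSingPrefix (x : Char) (xs : List Char) : [x] <+: xs ↔ xs.head? = some x := by
  cases xs with
  | nil => simp
  | cons y t => simp [List.cons_prefix_cons, eq_comm]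

lemma pvSpan : ∀ (cs : List Char) (k : Nat) (hk : k < cs.length),
    cs[k] = '<' → (∀ i (hik : i < k), cs[i]'(by omega) ≠ '<') →
    cs.takeWhile (fun c => c != '<') = cs.take k ∧ cs.dropWhile (fun c => c != '<') = cs.drop k := by
  intro cs
  induction cs with
  | nil => intro k hk; simp at hk
  | cons c t ih =>
    intro k hk hat hbefore
    cases k with
    | zero =>
      simp at hat
      subst hat
      simp [List.takeWhile, List.dropWhile]
    | succ j =>
      have hc : c ≠ '<' := hbefore 0 (Nat.succ_pos j)
      have hj : j < t.length := by simpa using hk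
      have hatj : t[j] = '<' := by simpa using hat
      have hbj : ∀ i (hij : i < j), t[i]'(by omega) ≠ '<' := by
        intro i hij
        have := hbefore (i+1) (by omega)
        simpa using this
      obtain ⟨h1, h2⟩ := ih j hj hatj hbj
      have hb : (c != '<') = true := bne_iff_ne.mpr hc
      constructor
      · simp [List.takeWhile, hb, h1]
      · simp [List.dropWhile, hb, h2]

lemma pvSliceInner (xs : List Char) (k : Nat) (h : k < xs.length) :
    PySem.List.slice xs (some ((k : Int) + 1)) (some (-1)) = (xs.drop (k+1)).dropLast := by
  simp only [PySem.List.slice, PySem.List.clampIdx]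
  split_ifs with h1 h2 h3 <;> try omega
  have hA : ((xs.length : Int) + -1).toNat = xs.length - 1 := by omega
  have hB : min ((k:Int) + 1).toNat xs.length = k + 1 := by omega
  rw [hA, hB, List.dropLast_eq_take, List.length_drop]
  congr 1
  omega

-- ===== VERDICT (by name: the statement is the Claim_ definition above) =====
theorem parse_tmpl_spec : Claim_equal_parse_tmpl := by
  intro name _h
  unfold Spec_parse_tmpl parse_tmpl parse_tmpl_alt
  by_cases hg : PySem.Chars.find name.toList ['<'] < 0 ∨ PySem.Chars.endswith name.toList ['>'] = false
  · have hg' : PySem.Chars.isIn ['<'] name.toList = false ∨ PySem.Chars.endswith name.toList ['>'] = false := by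
      rcases hg with h | h
      · left
        rw [PySem.Chars.isIn_eq_false_iff, ← PySem.Chars.find_eq_neg_one_iff]
        have := PySem.Chars.neg_one_le_find name.toList ['<']
        omega
      · right; exact h
    simp only [hg, hg', if_pos]
  · have hge : 0 ≤ PySem.Chars.find name.toList ['<'] := by
      push_neg at hg
      omega
    have hinf : ['<'] <:+: name.toList := (PySem.Chars.find_nonneg_iff _ _).mp hge
    have hisin : ¬ (PySem.Chars.isIn ['<'] name.toList = false ∨ PySem.Chars.endswith name.toList ['>'] = false) := by
      push_neg at hg ⊢
      refine ⟨?_, hg.2⟩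
      have ht : PySem.Chars.isIn ['<'] name.toList = true := by
        rw [PySem.Chars.isIn_iff_infix]
        exact hinf
      simp [ht]
    simp only [hg, hisin, if_neg, not_false_iff]
    -- locate the first '<'
    obtain ⟨hpre, hmin⟩ := PySem.Chars.find_spec (s := name.toList) (sub := ['<']) hge
    set k := (PySem.Chars.find name.toList ['<']).toNat with hkdef
    have hlt : PySem.Chars.find name.toList ['<'] = (k : Int) := by omega
    have hhead : (name.toList.drop k).head? = some '<' := (pvSingPrefix _ _).mp hpre
    have hk : k < name.toList.length := by
      by_contra hbig
      rw [List.drop_eq_nil_of_le (by omega)] at hhead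
      simp at hhead
    have hat : name.toList[k] = '<' := by
      rw [List.head?_drop] at hhead
      simpa [List.getElem?_eq_getElem hk] using hhead
    have hbefore : ∀ i (hik : i < k), name.toList[i]'(by omega) ≠ '<' := by
      intro i hik hcontra
      apply hmin i hik
      rw [pvSingPrefix, List.head?_drop, List.getElem?_eq_getElem (by omega), hcontra]
    obtain ⟨hTake, hDrop⟩ := pvSpan name.toList k hk hat hbefore
    -- outer parts agree
    have houter : PySem.Chars.slice name.toList none (some (PySem.Chars.find name.toList ['<']))
        = name.toList.takeWhile (fun c => c != '<') := by
      rw [hTake, PySem.Chars.slice_eq_listSlice, PySem.List.slice_to (hb := hge), hlt]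
      simp
    -- inner parts agree
    have hinner : PySem.Chars.slice name.toList (some (PySem.Chars.find name.toList ['<'] + 1)) (some (-1))
        = PySem.Chars.slice ((name.toList.dropWhile (fun c => c != '<')).drop 1) none (some (-1)) := by
      rw [hDrop, List.drop_drop, PySem.Chars.slice_eq_listSlice, PySem.Chars.slice_eq_listSlice,
          PySem.List.slice_to_neg_one, hlt, pvSliceInner _ _ hk]
    rw [houter, hinner, pvMain]
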